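-- pv_equiv track=rewrite | github.com/SHIELD-EAAI/SHIELD | scripts/graph3.py | _has_suspicious_operations
-- ===== SOURCE A (Python) =====
-- def _has_suspicious_operations(operations):
--     last_operation = None
--     last_process = None
--
--     for _, event, process_uuid in operations:
--         if event in ['read', 'write', 'execute', 'modify', 'fork']:
--             if last_operation:
--                 if event != last_operation and process_uuid != last_process:
--                     return True
--
--             last_operation = event
--             last_process = process_uuid
--
--     return False
-- ===== SOURCE B (Python) =====
-- def _has_suspicious_operations(operations):
--     ALLOWED = frozenset(('read', 'write', 'execute', 'modify', 'fork'))
--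
--     # Divide and conquer: each half is summarised by
--     # (found, first_allowed_pair_or_None, last_allowed_pair_or_None);
--     # two halves combine by checking the boundary pair (last of left, first of right).
--     def solve(lo, hi):
--         if hi - lo == 0:
--             return (False, None, None)
--         if hi - lo == 1:
--             _, e, p = operations[lo]
--             if e in ALLOWED:
--                 return (False, (e, p), (e, p))
--             return (False, None, None)
--         mid = (lo + hi) // 2
--         fl, firstl, lastl = solve(lo, mid)
--         fr, firstr, lastr = solve(mid, hi)
--         cross = (lastl is not None and firstr is not None
--                  and lastl[0] != firstr[0] and lastl[1] != firstr[1])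
--         first = firstl if firstl is not None else firstr
--         last = lastr if lastr is not None else lastl
--         return (fl or fr or cross, first, last)
--
--     return solve(0, len(operations))[0]
-- ===== Notes on version B (the rewrite author's own statement) =====
-- stated objective: alternative
-- what changed: Replaces A's linear stateful scan with a divide-and-conquer recursion: each half is summarised by (found, first allowed pair, last allowed pair) and halves are merged by testing only the boundary pair.
import Mathlib
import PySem

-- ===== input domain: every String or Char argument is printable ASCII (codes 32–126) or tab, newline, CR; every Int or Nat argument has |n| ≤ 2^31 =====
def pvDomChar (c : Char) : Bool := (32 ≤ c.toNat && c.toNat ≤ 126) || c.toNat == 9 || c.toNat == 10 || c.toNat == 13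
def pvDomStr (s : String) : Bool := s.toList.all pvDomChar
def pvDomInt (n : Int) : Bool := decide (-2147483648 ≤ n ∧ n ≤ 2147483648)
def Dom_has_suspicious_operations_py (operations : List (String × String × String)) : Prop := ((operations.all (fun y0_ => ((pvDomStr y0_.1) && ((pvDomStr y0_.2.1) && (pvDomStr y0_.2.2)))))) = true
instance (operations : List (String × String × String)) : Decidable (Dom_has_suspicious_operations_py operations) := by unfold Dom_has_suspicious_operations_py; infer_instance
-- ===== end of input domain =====

-- B replaces A's linear stateful scan by a divide-and-conquer recursion whose halves are
-- summarised by (found, first allowed pair, last allowed pair) (alternative; same cost).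


-- ===== PORT A =====
-- the allowed-event membership test `event in ['read', ...]`
def pvAllowed (e : String) : Bool :=
  e == "read" || e == "write" || e == "execute" || e == "modify" || e == "fork"

-- A's loop: state = (last_operation, last_process); `if last_operation:` is the
-- truthiness test, modelled as the Option being set (allowed events are nonempty strings)
def pvLoopA : List (String × String × String) → Option (String × String) → Bool
  | [], _ => false
  | (_, event, process_uuid) :: rest, st =>
    if pvAllowed event then
      match st with
      | some (lo, lp) =>
        if event != lo && process_uuid != lp then true
        else pvLoopA rest (some (event, process_uuid))
      | none => pvLoopA rest (some (event, process_uuid))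
    else pvLoopA rest st

def has_suspicious_operations_py (operations : List (String × String × String)) : Bool :=
  pvLoopA operations none

-- ===== PORT B =====
-- `lastl is not None and firstr is not None and lastl[0] != firstr[0] and lastl[1] != firstr[1]`
def pvCross : Option (String × String) → Option (String × String) → Bool
  | some a, some b => a.1 != b.1 && a.2 != b.2
  | _, _ => false

-- B's solve(lo, hi): the segment operations[lo:hi] is the list argument; mid = (lo+hi)//2
-- corresponds to splitting the segment at half its length
def pvSolve : List (String × String × String) →
    Bool × Option (String × String) × Option (String × String)
  | [] => (false, none, none)
  | [(_, e, p)] =>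
    if pvAllowed e then (false, some (e, p), some (e, p)) else (false, none, none)
  | x :: y :: rest =>
    let mid := (x :: y :: rest).length / 2
    let (fl, firstl, lastl) := pvSolve ((x :: y :: rest).take mid)
    let (fr, firstr, lastr) := pvSolve ((x :: y :: rest).drop mid)
    let cross := pvCross lastl firstr
    (fl || fr || cross, firstl.or firstr, lastr.or lastl)
termination_by l => l.length
decreasing_by
  · simp [List.length_take]; omega
  · simp [List.length_drop]; omega

def has_suspicious_operations_py_alt (operations : List (String × String × String)) : Bool :=
  (pvSolve operations).1

-- ===== PRECONDITION & SPEC =====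
def Spec_has_suspicious_operations_py (operations : List (String × String × String)) (out : Bool) : Prop := out = has_suspicious_operations_py_alt operations
instance (operations : List (String × String × String)) (out : Bool) : Decidable (Spec_has_suspicious_operations_py operations out) := by unfold Spec_has_suspicious_operations_py; infer_instance

-- ===== CLAIM (what is proved, stated in full; the proofs are below) =====
def Claim_equal_has_suspicious_operations_py : Prop := ∀ (operations : List (String × String × String)), Dom_has_suspicious_operations_py operations → Spec_has_suspicious_operations_py operations (has_suspicious_operations_py operations)

-- ===== LEMMAS AND PROOFS =====
-- spec-side helpers: the filtered (event, process) pairs and "some adjacent pair differs in both"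
def pvPairs (operations : List (String × String × String)) : List (String × String) :=
  (operations.filter (fun t => pvAllowed t.2.1)).map (fun t => (t.2.1, t.2.2))

def pvAnyAdj : List (String × String) → Bool
  | (e1, p1) :: (e2, p2) :: rest =>
    (e2 != e1 && p2 != p1) || pvAnyAdj ((e2, p2) :: rest)
  | _ => false

theorem pvPairs_append (xs ys : List (String × String × String)) :
    pvPairs (xs ++ ys) = pvPairs xs ++ pvPairs ys := by
  simp [pvPairs]

theorem pvAnyAdj_append (xs ys : List (String × String)) :
    pvAnyAdj (xs ++ ys) = (pvAnyAdj xs || pvAnyAdj ys || pvCross xs.getLast? ys.head?) := by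
  induction xs with
  | nil => cases ys <;> simp [pvAnyAdj, pvCross]
  | cons x xs ih =>
    obtain ⟨e1, p1⟩ := x
    cases xs with
    | nil =>
      cases ys with
      | nil => simp [pvAnyAdj, pvCross]
      | cons y ys' =>
        obtain ⟨e2, p2⟩ := y
        by_cases h1 : e1 = e2 <;> by_cases h2 : p1 = p2
        · simp [pvAnyAdj, pvCross, h1, h2]
        · simp [pvAnyAdj, pvCross, h1]
        · simp [pvAnyAdj, pvCross, h2]
        · have a1 : (e2 != e1) = true := bne_iff_ne.mpr (Ne.symm h1)
          have a2 : (p2 != p1) = true := bne_iff_ne.mpr (Ne.symm h2)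
          have b1 : (e1 != e2) = true := bne_iff_ne.mpr h1
          have b2 : (p1 != p2) = true := bne_iff_ne.mpr h2
          simp [pvAnyAdj, pvCross, a1, a2, b1, b2]
    | cons z xs' =>
      obtain ⟨e2, p2⟩ := z
      simp only [List.cons_append, pvAnyAdj, List.getLast?_cons_cons]
      simp only [List.cons_append] at ih
      rw [ih]
      cases (e2 != e1 && p2 != p1) <;> simp [Bool.or_assoc]

-- B's divide-and-conquer summary computes exactly (pvAnyAdj, head?, getLast?) of the pairs
theorem pvSolve_eq (l : List (String × String × String)) :
    pvSolve l = (pvAnyAdj (pvPairs l), (pvPairs l).head?, (pvPairs l).getLast?) := by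
  fun_induction pvSolve l
  case case1 => simp [pvPairs, pvAnyAdj]
  case case2 t e p h => simp [pvPairs, pvAnyAdj, h]
  case case3 t e p h => simp [pvPairs, pvAnyAdj, h]
  case case4 a b rest mid f1 fi1 la1 heq1 f2 fi2 la2 heq2 cross ihT ihD =>
    rw [ihT] at heq1
    rw [ihD] at heq2
    simp only [Prod.mk.injEq] at heq1 heq2
    obtain ⟨rfl, rfl, rfl⟩ := heq1
    obtain ⟨rfl, rfl, rfl⟩ := heq2
    have hsplit : pvPairs (a :: b :: rest) =
        pvPairs ((a :: b :: rest).take ((a :: b :: rest).length / 2)) ++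
        pvPairs ((a :: b :: rest).drop ((a :: b :: rest).length / 2)) := by
      rw [← pvPairs_append, List.take_append_drop]
    rw [hsplit, pvAnyAdj_append, List.head?_append, List.getLast?_append]

-- A's loop with state st equals the adjacent-pair scan over st's pair (if any)
-- prepended to the filtered pairs of the remaining input.
theorem pvLoopA_eq_pvAnyAdj (ops : List (String × String × String))
    (st : Option (String × String)) :
    pvLoopA ops st = pvAnyAdj ((st.map id).toList ++ pvPairs ops) := by
  induction ops generalizing st with
  | nil =>
    cases st with
    | none => rfl
    | some x => cases x; rfl
  | cons hd tl ih =>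
    obtain ⟨t, event, process⟩ := hd
    by_cases h : pvAllowed event = true
    · cases st with
      | none =>
        simp [pvLoopA, pvPairs, h, ih (some (event, process))]
      | some x =>
        obtain ⟨lo, lp⟩ := x
        by_cases hc : (event != lo && process != lp) = true
        · simp [pvLoopA, pvPairs, h, hc, pvAnyAdj]
        · simp only [Bool.not_eq_true] at hc
          simp [pvLoopA, pvPairs, h, hc, pvAnyAdj, ih (some (event, process))]
    · cases st with
      | none => simp [pvLoopA, pvPairs, h, ih none]
      | some x => obtain ⟨lo, lp⟩ := x; simp [pvLoopA, pvPairs, h, ih (some (lo, lp))]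

-- ===== VERDICT (by name: the statement is the Claim_ definition above) =====
theorem has_suspicious_operations_py_spec : Claim_equal_has_suspicious_operations_py := by
  intro ops _
  unfold Spec_has_suspicious_operations_py has_suspicious_operations_py has_suspicious_operations_py_alt
  rw [pvSolve_eq]
  simpa using pvLoopA_eq_pvAnyAdj ops none
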